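-- pv_equiv track=rewrite | github.com/dongzizhu/short_interest_prediction | notebooks/Agent_iterative_selecting.py | extract_function_from_response
-- ===== SOURCE A (Python) =====
-- def extract_function_from_response(response_text: str) -> str:
--     """Extract the construct_features function from Claude's response"""
--     lines = response_text.split('\n')
--     function_lines = []
--     in_function = False
--     indent_level = 0
--
--     for line in lines:
--         if 'def construct_features' in line:
--             in_function = True
--             function_lines.append(line)
--             indent_level = len(line) - len(line.lstrip())
--         elif in_function:
--             if line.strip() == '':
--                 function_lines.append(line)
--             elif len(line) - len(line.lstrip()) > indent_level or line.strip() == '':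
--                 function_lines.append(line)
--             else:
--                 break
--
--     extracted_code = '\n'.join(function_lines)
--
--     # Validate that we extracted a proper function
--     if not extracted_code.strip():
--         raise ValueError("No function code found in response")
--
--     if 'def construct_features' not in extracted_code:
--         raise ValueError("construct_features function definition not found in extracted code")
--
--     return extracted_code
-- ===== SOURCE B (Python) =====
-- def extract_function_from_response(response_text: str) -> str:
--     """Extract the construct_features function from Claude's response"""
--     s = response_text
--     n = len(s)
--     pos = s.find('def construct_features')
--     if pos == -1:
--         raise ValueError("No function code found in response")
--     start = s[:pos].rfind('\n') + 1
--     i = start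
--     while i < n and s[i] != '\n' and s[i].isspace():
--         i += 1
--     indent = i - start
--     end = s.find('\n', start)
--     while end != -1:
--         j = end + 1
--         while j < n and s[j] != '\n' and s[j].isspace():
--             j += 1
--         if j < n and s[j] != '\n' and j - (end + 1) <= indent:
--             break
--         end = s.find('\n', j)
--     return s[start:] if end == -1 else s[start:end]
-- ===== Notes on version B (the rewrite author's own statement) =====
-- stated objective: alternative
-- what changed: B never materializes a list of lines: it works directly on the raw string with find/rfind and character-index arithmetic (locate the anchor occurrence, rfind the start of its line, scan whitespace runs to test each following line in place) and returns a single slice s[start:end], where A splits into lines, runs a stateful flag/indent loop collecting lines, and re-joins them.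
-- outside the precondition, e.g. on extract_function_from_response('no function here'): A raises ValueError, B raises ValueError
import Mathlib
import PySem

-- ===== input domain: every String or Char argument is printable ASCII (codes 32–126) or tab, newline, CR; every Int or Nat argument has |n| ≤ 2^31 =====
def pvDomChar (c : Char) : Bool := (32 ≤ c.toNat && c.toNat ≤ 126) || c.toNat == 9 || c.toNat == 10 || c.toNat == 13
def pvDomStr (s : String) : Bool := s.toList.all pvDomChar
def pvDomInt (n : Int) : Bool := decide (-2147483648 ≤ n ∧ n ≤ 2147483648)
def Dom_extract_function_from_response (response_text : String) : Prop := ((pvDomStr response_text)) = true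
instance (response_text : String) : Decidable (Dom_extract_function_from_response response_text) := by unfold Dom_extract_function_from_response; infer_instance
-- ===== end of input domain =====

-- B extracts the function by raw-string index arithmetic (find/rfind + whitespace scans, one final slice)
-- instead of A's split-into-lines, stateful collect loop, re-join; an alternative of the same O(n) cost.


-- ===== PORT A =====
-- 'def construct_features' in line
def pvAnchorA (l : List Char) : Bool := PySem.Chars.isIn "def construct_features".toList l
-- len(line) - len(line.lstrip())
def pvIndentA (l : List Char) : Nat := l.length - (PySem.Chars.lstrip l).length
-- the for-loop with its state (function_lines, in_function, indent_level); returning acc = break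
def pvLoopA : List (List Char) → List (List Char) → Bool → Nat → List (List Char)
  | [], acc, _, _ => acc
  | l :: rest, acc, inF, ind =>
    if pvAnchorA l then pvLoopA rest (acc ++ [l]) true (pvIndentA l)
    else if inF then
      if PySem.Chars.strip l = [] then pvLoopA rest (acc ++ [l]) inF ind
      else if pvIndentA l > ind ∨ PySem.Chars.strip l = [] then pvLoopA rest (acc ++ [l]) inF ind
      else acc
    else pvLoopA rest acc inF ind

-- the two validation checks; "" stands in for the two ValueErrors (unreachable inside Pre_)
def pvValidateA (extracted_code : List Char) : String :=
  if PySem.Chars.strip extracted_code = [] then ""  -- raise ValueError("No function code found in response")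
  else if pvAnchorA extracted_code = false then ""  -- raise ValueError("construct_features function definition not found in extracted code")
  else String.ofList extracted_code

def extract_function_from_response (response_text : String) : String :=
  pvValidateA (PySem.Chars.join "\n".toList
    (pvLoopA (PySem.Chars.splitOn response_text.toList "\n".toList) [] false 0))

-- ===== PORT B =====
-- s[i] != '\n' and s[i].isspace()   (the test of both inner while-loops)
def pvWs (c : Char) : Bool := decide (c ≠ '\n') && PySem.Chars.isspace c
-- 'while i < n and s[i] != '\n' and s[i].isspace(): i += 1' — number of steps taken, as
-- recursion on the suffix s[i:] (index loop ≅ structural recursion on the remaining characters)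
def pvSkipWs : List Char → Nat
  | [] => 0
  | c :: r => if pvWs c then pvSkipWs r + 1 else 0
-- the outer 'while end != -1' loop; fuel ≥ one unit per iteration (each iteration strictly
-- advances end towards len(s), so cs.length + 1 units always suffice); cs.getD j ' ' is s[j],
-- read only under the guard j < cs.length
def pvLoopB (cs : List Char) (indent : Nat) : Nat → Int → Int
  | 0, e => e
  | fuel+1, e =>
    if e = -1 then e
    else
      let j := e.toNat + 1 + pvSkipWs (cs.drop (e.toNat + 1))
      if j < cs.length ∧ cs.getD j ' ' ≠ '\n' ∧ (j : Int) - (e + 1) ≤ (indent : Int) then e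
      else pvLoopB cs indent fuel (PySem.Chars.findFrom cs ['\n'] (j : Int))

def extract_function_from_response_alt (response_text : String) : String :=
  let cs := response_text.toList
  let pos := PySem.Chars.find cs "def construct_features".toList
  if pos = -1 then ""  -- raise ValueError("No function code found in response")
  else
    let start := (PySem.Chars.rfind (PySem.Chars.slice cs none (some pos)) ['\n'] + 1).toNat
    let indent := pvSkipWs (cs.drop start)
    let e := pvLoopB cs indent (cs.length + 1) (PySem.Chars.findFrom cs ['\n'] (start : Int))
    if e = -1 then String.ofList (PySem.Chars.slice cs (some (start : Int)) none)
    else String.ofList (PySem.Chars.slice cs (some (start : Int)) (some e))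

-- ===== PRECONDITION & SPEC =====
-- Pre_ excludes (a) inputs with no line containing the anchor text both programs search for, on
-- which A raises ValueError, and (b) inputs with SEVERAL such lines, a corner no caller specifies:
-- A re-anchors its indent threshold at every such line while B keeps the first anchor line's
-- threshold — both defensible.
def Pre_extract_function_from_response (response_text : String) : Prop :=
  (PySem.Chars.splitOn response_text.toList "\n".toList).countP
    (fun l => PySem.Chars.isIn "def construct_features".toList l) = 1
instance (response_text : String) : Decidable (Pre_extract_function_from_response response_text) := by
  unfold Pre_extract_function_from_response; infer_instance

def pvWitness_extract_function_from_response : String :=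
  "def construct_features(df):\n    return df\nprint(1)"

def Spec_extract_function_from_response (response_text : String) (out : String) : Prop := out = extract_function_from_response_alt response_text
instance (response_text : String) (out : String) : Decidable (Spec_extract_function_from_response response_text out) := by unfold Spec_extract_function_from_response; infer_instance

-- ===== CLAIM (what is proved, stated in full; the proofs are below) =====
def Claim_equal_extract_function_from_response : Prop := ∀ (response_text : String), Dom_extract_function_from_response response_text → Pre_extract_function_from_response response_text → Spec_extract_function_from_response response_text (extract_function_from_response response_text)

-- ===== LEMMAS AND PROOFS =====

-- the keep-test both programs implement: blank line, or indented deeper than ind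
def pvKeep (ind : Nat) (l : List Char) : Bool :=
  decide (PySem.Chars.strip l = []) || decide (pvIndentA l > ind)

-- ---------- A-side: the flag loop is skip-to-anchor + takeWhile ----------

-- before the anchor line, A's loop skips lines without touching its state
theorem pvLoopA_skip (pre ls : List (List Char)) (acc : List (List Char)) (n : Nat)
    (h : ∀ l ∈ pre, pvAnchorA l = false) :
    pvLoopA (pre ++ ls) acc false n = pvLoopA ls acc false n := by
  induction pre with
  | nil => rfl
  | cons l pre ih =>
      have hl : pvAnchorA l = false := h l (by simp)
      rw [List.cons_append]
      show (if pvAnchorA l = true then _ else if false = true then _ else pvLoopA (pre ++ ls) acc false n) = _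
      rw [if_neg (by simp [hl]), if_neg (by simp)]
      exact ih (fun x hx => h x (by simp [hx]))

-- once inside the function (and no further anchor line), A's loop is a takeWhile
theorem pvLoopA_body (ls : List (List Char)) (acc : List (List Char)) (n : Nat)
    (h : ∀ l ∈ ls, pvAnchorA l = false) :
    pvLoopA ls acc true n = acc ++ ls.takeWhile (pvKeep n) := by
  induction ls generalizing acc with
  | nil => simp [pvLoopA]
  | cons l rest ih =>
      have hl : pvAnchorA l = false := h l (by simp)
      have hrest : ∀ x ∈ rest, pvAnchorA x = false := fun x hx => h x (by simp [hx])
      show (if pvAnchorA l = true then _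
        else if true = true then
          if PySem.Chars.strip l = [] then pvLoopA rest (acc ++ [l]) true n
          else if pvIndentA l > n ∨ PySem.Chars.strip l = [] then pvLoopA rest (acc ++ [l]) true n
          else acc
        else _) = _
      rw [if_neg (by simp [hl]), if_pos rfl]
      by_cases hb : PySem.Chars.strip l = []
      · have hk : pvKeep n l = true := by simp [pvKeep, hb]
        rw [if_pos hb, ih _ hrest, List.takeWhile_cons, hk]
        simp
      · by_cases hi : pvIndentA l > n
        · have hk : pvKeep n l = true := by simp [pvKeep, hi]
          rw [if_neg hb, if_pos (Or.inl hi), ih _ hrest, List.takeWhile_cons, hk]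
          simp
        · have hk : pvKeep n l = false := by simp [pvKeep, hb, hi]
          rw [if_neg hb, if_neg (by tauto), List.takeWhile_cons, hk]
          simp

-- if some character of cs is not whitespace, cs does not strip to empty
theorem strip_ne_nil_of_mem_not_space (cs : List Char) (c : Char) (hc : c ∈ cs)
    (hs : PySem.Chars.isspace c = false) : PySem.Chars.strip cs ≠ [] := by
  intro h
  have h3 : List.dropWhile PySem.Chars.isspace
      (List.dropWhile PySem.Chars.isspace cs).reverse = [] := by
    simpa [PySem.Chars.strip, PySem.Chars.rstrip, PySem.Chars.lstrip]
      using congrArg List.reverse h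
  have hall' : ∀ x ∈ cs, PySem.Chars.isspace x = true := by
    intro x hx
    rcases List.mem_append.mp ((List.takeWhile_append_dropWhile
        (p := PySem.Chars.isspace) (l := cs)) ▸ hx) with h | h
    · exact List.mem_takeWhile_imp h
    · exact List.dropWhile_eq_nil_iff.mp h3 x (by simpa using h)
  have := hall' c hc
  rw [hs] at this
  exact absurd this (by simp)

-- ---------- line decomposition: splitOn '\n' characterized ----------

def pvLines (cs : List Char) : List (List Char) :=
  match h : cs.dropWhile (· ≠ '\n') with
  | [] => [cs.takeWhile (· ≠ '\n')]
  | _ :: r => cs.takeWhile (· ≠ '\n') :: pvLines r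
termination_by cs.length
decreasing_by
  have h1 : (cs.dropWhile (· ≠ '\n')).length ≤ cs.length := List.length_dropWhile_le ..
  rw [h] at h1; simp at h1; omega

theorem pvLines_ne_nil (cs : List Char) : pvLines cs ≠ [] := by
  rw [pvLines]; split <;> simp

theorem pvLines_eq_of_drop_nil (l : List Char) (h : l.dropWhile (· ≠ '\n') = []) :
    pvLines l = [l.takeWhile (· ≠ '\n')] := by
  rw [pvLines]; split
  next => rfl
  next y r h2 => rw [h] at h2; cases h2

theorem pvLines_eq_of_drop_cons (l : List Char) (y : Char) (r : List Char)
    (h : l.dropWhile (· ≠ '\n') = y :: r) :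
    pvLines l = l.takeWhile (· ≠ '\n') :: pvLines r := by
  rw [pvLines]; split
  next h2 => rw [h] at h2; cases h2
  next z zs h2 => rw [h] at h2; cases h2; rfl

theorem pvLines_nil : pvLines [] = [[]] := by
  rw [pvLines_eq_of_drop_nil [] (by simp)]; rfl

theorem pvLines_cons_nl (rest : List Char) : pvLines ('\n' :: rest) = [] :: pvLines rest := by
  rw [pvLines_eq_of_drop_cons ('\n' :: rest) '\n' rest (by simp)]
  simp

theorem pvLines_cons_ne (c : Char) (rest : List Char) (hcne : c ≠ '\n') :
    pvLines (c :: rest) =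
      (match pvLines rest with
       | [] => [[c]]
       | x :: xs => (c :: x) :: xs) := by
  cases hr : rest.dropWhile (· ≠ '\n') with
  | nil =>
      rw [pvLines_eq_of_drop_nil (c :: rest)
          (by simp [hcne]; simpa using List.dropWhile_eq_nil_iff.mp hr),
        pvLines_eq_of_drop_nil rest hr]
      rw [List.takeWhile_cons_of_pos (by simp [hcne])]
  | cons y r =>
      rw [pvLines_eq_of_drop_cons (c :: rest) y r
          (by simp [hcne]; simpa using hr),
        pvLines_eq_of_drop_cons rest y r hr]
      rw [List.takeWhile_cons_of_pos (by simp [hcne])]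

theorem drop_head_false {p : Char → Bool} {x : List Char} {c : Char} {r : List Char}
    (h : x.dropWhile p = c :: r) : p c = false := by
  have := List.head?_dropWhile_not p x
  rw [h] at this
  simpa using this

theorem pvLines_join (cs : List Char) :
    PySem.Chars.join ['\n'] (pvLines cs) = cs := by
  induction cs using pvLines.induct with
  | case1 x h =>
      rw [pvLines_eq_of_drop_nil x h, PySem.Chars.join_singleton]
      conv_rhs => rw [← List.takeWhile_append_dropWhile (p := (· ≠ '\n')) (l := x)]
      rw [h]; simp
  | case2 x c r h ih =>
      have hc : c = '\n' := by
        have := drop_head_false h; simpa using this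
      rw [pvLines_eq_of_drop_cons x c r h]
      obtain ⟨z, zs, hz⟩ : ∃ z zs, pvLines r = z :: zs := by
        cases hr : pvLines r with
        | nil => exact absurd hr (pvLines_ne_nil r)
        | cons z zs => exact ⟨z, zs, rfl⟩
      rw [hz, PySem.Chars.join_cons_cons, ← hz, ih]
      conv_rhs => rw [← List.takeWhile_append_dropWhile (p := (· ≠ '\n')) (l := x)]
      rw [h, hc]; simp

theorem pvLines_no_nl (cs : List Char) : ∀ l ∈ pvLines cs, '\n' ∉ l := by
  induction cs using pvLines.induct with
  | case1 x h =>
      rw [pvLines_eq_of_drop_nil x h]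
      intro l hl
      simp at hl
      subst hl
      intro hmem
      have := List.mem_takeWhile_imp hmem; simp at this
  | case2 x c r h ih =>
      rw [pvLines_eq_of_drop_cons x c r h]
      intro l hl
      rcases List.mem_cons.mp hl with rfl | hl
      · intro hmem
        have := List.mem_takeWhile_imp hmem; simp at this
      · exact ih l hl

theorem splitOn_go_spec (fuel : Nat) : ∀ (l cur : List Char) (acc : List (List Char)),
    l.length ≤ fuel →
    PySem.Chars.splitOn.go ['\n'] fuel l cur acc =
      acc.reverse ++ (match pvLines l with
        | [] => [cur.reverse]
        | x :: xs => (cur.reverse ++ x) :: xs) := by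
  induction fuel with
  | zero =>
      intro l cur acc hf
      have hl : l = [] := by cases l <;> simp_all
      subst hl
      rw [PySem.Chars.splitOn.go, pvLines_nil]
      simp
  | succ fuel ih =>
      intro l cur acc hf
      cases l with
      | nil =>
          rw [PySem.Chars.splitOn.go, pvLines_nil]
          simp
          omega
      | cons c rest =>
          rw [PySem.Chars.splitOn.go]
          by_cases hc : c = '\n'
          · subst hc
            have hp : ['\n'].isPrefixOf ('\n' :: rest) = true := by simp [List.isPrefixOf]
            rw [if_pos hp]
            have hdrop : List.drop ['\n'].length ('\n' :: rest) = rest := rfl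
            rw [hdrop]
            simp only [List.length_cons] at hf
            rw [ih rest [] _ (by omega), pvLines_cons_nl]
            cases hr : pvLines rest with
            | nil => exact absurd hr (pvLines_ne_nil rest)
            | cons y ys => simp [hr]
          · have hp : ['\n'].isPrefixOf (c :: rest) = false := by
              simp [List.isPrefixOf, Ne.symm hc]
            rw [if_neg (by simp [hp])]
            simp only [List.length_cons] at hf
            rw [ih rest (c :: cur) _ (by omega), pvLines_cons_ne c rest hc]
            cases hr : pvLines rest with
            | nil => exact absurd hr (pvLines_ne_nil rest)
            | cons y ys => simp [hr]

theorem splitOn_eq_pvLines (cs : List Char) :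
    PySem.Chars.splitOn cs ['\n'] = pvLines cs := by
  rw [PySem.Chars.splitOn, splitOn_go_spec _ _ _ _ (by omega)]
  cases hr : pvLines cs with
  | nil => exact absurd hr (pvLines_ne_nil cs)
  | cons y ys => simp [hr]

-- ---------- find / rfind on a single character ----------

theorem isPrefixOf_singleton (c : Char) (s : List Char) :
    [c].isPrefixOf s = (s[0]? == some c) := by
  cases s <;> simp [List.isPrefixOf, eq_comm]

theorem find_go_char (c : Char) : ∀ (l : List Char) (k : Nat),
    PySem.Chars.find.go [c] l k =
      if c ∈ l then ((k + (l.takeWhile (· ≠ c)).length : Nat) : Int) else -1 := by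
  intro l
  induction l with
  | nil => intro k; rw [PySem.Chars.find.go]; simp
  | cons x t ih =>
      intro k
      rw [PySem.Chars.find.go]
      by_cases hx : x = c
      · subst hx
        rw [if_pos (by simp [List.isPrefixOf])]
        simp
      · rw [if_neg (by simp [isPrefixOf_singleton, hx])]
        rw [ih (k + 1)]
        by_cases hm : c ∈ t
        · rw [if_pos hm, if_pos (by simp [hm])]
          rw [List.takeWhile_cons_of_pos (by simp [hx])]
          push_cast
          simp
          omega
        · rw [if_neg hm, if_neg (by simp [hm]; exact fun h => hx h.symm)]

theorem find_char (l : List Char) (c : Char) :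
    PySem.Chars.find l [c] =
      if c ∈ l then (((l.takeWhile (· ≠ c)).length : Nat) : Int) else -1 := by
  rw [PySem.Chars.find, find_go_char]
  simp

theorem rfind_go_char_none (s : List Char) (c : Char) : ∀ (k : Nat),
    (∀ j ≤ k, s[j]? ≠ some c) →
    PySem.Chars.rfind.go s [c] k = -1 := by
  intro k
  induction k with
  | zero =>
      intro h
      rw [PySem.Chars.rfind.go]
      rw [if_neg]
      simp [isPrefixOf_singleton]
      intro he
      exact absurd he (h 0 (by omega))
  | succ k ih =>
      intro h
      rw [PySem.Chars.rfind.go]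
      rw [if_neg]
      · exact ih (fun j hj => h j (by omega))
      · simp [isPrefixOf_singleton]
        intro he
        exact absurd he (h (k+1) (by omega))

theorem rfind_go_char_hit (s : List Char) (c : Char) : ∀ (k i : Nat),
    i ≤ k → s[i]? = some c →
    (∀ j, i < j → j ≤ k → s[j]? ≠ some c) →
    PySem.Chars.rfind.go s [c] k = (i : Int) := by
  intro k
  induction k with
  | zero =>
      intro i hik hc _
      interval_cases i
      rw [PySem.Chars.rfind.go]
      rw [if_pos (by simp [isPrefixOf_singleton, hc])]
      simp
  | succ k ih =>
      intro i hik hc hmax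
      rw [PySem.Chars.rfind.go]
      by_cases he : s[k+1]? = some c
      · have : i = k + 1 := by
          by_contra hne
          exact absurd he (hmax (k+1) (by omega) (by omega))
        subst this
        rw [if_pos (by simp [isPrefixOf_singleton]; exact he)]
      · rw [if_neg]
        · have hik' : i ≤ k := by
            rcases Nat.lt_or_ge i (k+1) with h | h
            · omega
            · exfalso; have : i = k+1 := by omega
              subst this; exact he hc
          exact ih i hik' hc (fun j hj hjk => hmax j hj (by omega))
        · simp [isPrefixOf_singleton]
          exact he

theorem rfind_char_none (l : List Char) (c : Char) (h : c ∉ l) :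
    PySem.Chars.rfind l [c] = -1 := by
  rw [PySem.Chars.rfind]
  apply rfind_go_char_none
  intro j _ hj
  exact h (List.mem_of_getElem? hj)

theorem rfind_char_hit (l : List Char) (c : Char) (i : Nat)
    (hc : l[i]? = some c) (hmax : ∀ j, i < j → l[j]? ≠ some c) :
    PySem.Chars.rfind l [c] = (i : Int) := by
  rw [PySem.Chars.rfind]
  apply rfind_go_char_hit
  · have : i < l.length := by
      by_contra hlt
      rw [List.getElem?_eq_none (by omega)] at hc
      cases hc
    omega
  · exact hc
  · exact fun j hj _ => hmax j hj

-- ---------- whitespace / blank-line facts ----------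

theorem takeWhile_append' {α : Type} (p : α → Bool) (a b : List α) :
    List.takeWhile p (a ++ b) =
      if a.all p then a ++ List.takeWhile p b else List.takeWhile p a := by
  induction a with
  | nil => simp
  | cons x r ih => by_cases h : p x <;> simp [h, ih] <;> split_ifs <;> simp_all

theorem pvSkipWs_eq (l : List Char) : pvSkipWs l = (l.takeWhile pvWs).length := by
  induction l with
  | nil => rfl
  | cons c r ih => by_cases h : pvWs c <;> simp [pvSkipWs, h, ih]

theorem takeWhile_pvWs_eq_isspace (l : List Char) (h : '\n' ∉ l) :
    l.takeWhile pvWs = l.takeWhile PySem.Chars.isspace := by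
  induction l with
  | nil => rfl
  | cons c r ih =>
      have hc : c ≠ '\n' := fun e => h (e ▸ List.mem_cons_self ..)
      have hr : '\n' ∉ r := fun e => h (List.mem_cons_of_mem _ e)
      by_cases hs : PySem.Chars.isspace c <;> simp [pvWs, hc, hs, ih hr]

theorem indentA_eq_takeWhile (l : List Char) :
    pvIndentA l = (l.takeWhile PySem.Chars.isspace).length := by
  unfold pvIndentA PySem.Chars.lstrip
  have h2 := congrArg List.length (List.takeWhile_append_dropWhile
    (p := PySem.Chars.isspace) (l := l))
  rw [List.length_append] at h2
  omega

-- ---------- infix plumbing / join bookkeeping ----------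

theorem strip_eq_nil_iff (l : List Char) :
    PySem.Chars.strip l = [] ↔ (∀ c ∈ l, PySem.Chars.isspace c = true) := by
  unfold PySem.Chars.strip PySem.Chars.rstrip PySem.Chars.lstrip
  constructor
  · intro h c hc
    have h2 : ∀ x ∈ (List.dropWhile PySem.Chars.isspace l).reverse, PySem.Chars.isspace x = true := by
      intro x hx
      exact List.dropWhile_eq_nil_iff.mp (by simpa using congrArg List.reverse h) x hx
    rcases List.mem_append.mp ((List.takeWhile_append_dropWhile
        (p := PySem.Chars.isspace) (l := l)) ▸ hc) with h3 | h3
    · exact List.mem_takeWhile_imp h3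
    · exact h2 c (by simpa using h3)
  · intro h
    have : List.dropWhile PySem.Chars.isspace l = [] :=
      List.dropWhile_eq_nil_iff.mpr (fun x hx => h x hx)
    rw [this]
    simp

theorem prefix_no_c {sub a b : List Char} {c : Char}
    (h : sub <+: a ++ c :: b) (hc : c ∉ sub) : sub <+: a := by
  by_cases hlen : sub.length ≤ a.length
  · have h1 : sub = (a ++ c :: b).take sub.length := by
      rw [List.prefix_iff_eq_take] at h; exact h
    rw [List.take_append] at h1
    rw [List.prefix_iff_eq_take]
    rw [h1]
    have : sub.length - a.length = 0 := by omega
    rw [this]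
    simp [List.take_of_length_le hlen]
  · exfalso
    apply hc
    have h2 : (a ++ c :: b)[a.length]? = some c := by
      rw [List.getElem?_append_right (by omega)]
      simp
    have h3 : sub[a.length]? = some c := by
      obtain ⟨t, ht⟩ := h
      rw [← ht] at h2
      rw [List.getElem?_append_left (by omega)] at h2
      exact h2
    exact List.mem_of_getElem? h3

theorem infix_split {sub a b : List Char} {c : Char}
    (hne : sub ≠ []) (hc : c ∉ sub) (h : sub <:+: a ++ c :: b) :
    sub <:+: a ∨ sub <:+: b := by
  induction a with
  | nil =>
      right
      simp at h
      rcases (List.infix_cons_iff).mp h with h1 | h1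
      · exfalso
        have := prefix_no_c (a := []) (by simpa using h1) hc
        simp at this
        exact hne this
      · exact h1
  | cons x a' ih =>
      rcases (List.infix_cons_iff).mp (by simpa using h) with h1 | h1
      · left
        have := prefix_no_c (a := x :: a') (by simpa using h1) hc
        exact this.isInfix
      · rcases ih h1 with h2 | h2
        · exact Or.inl (List.infix_cons h2)
        · exact Or.inr h2

theorem infix_join_mem : ∀ (ls : List (List Char)) (sub : List Char),
    sub ≠ [] → '\n' ∉ sub →
    sub <:+: PySem.Chars.join ['\n'] ls → ∃ l ∈ ls, sub <:+: l := by
  intro ls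
  induction ls with
  | nil =>
      intro sub hne _ h
      rw [PySem.Chars.join_nil] at h
      simp at h
      exact absurd h hne
  | cons x r ih =>
      intro sub hne hnl h
      cases r with
      | nil =>
          rw [PySem.Chars.join_singleton] at h
          exact ⟨x, by simp, h⟩
      | cons y rs =>
          rw [PySem.Chars.join_cons_cons] at h
          have h2 : sub <:+: x ++ '\n' :: PySem.Chars.join ['\n'] (y :: rs) := by
            simpa using h
          rcases infix_split hne hnl h2 with h3 | h3
          · exact ⟨x, by simp, h3⟩
          · obtain ⟨l, hl, hsub⟩ := ih sub hne hnl h3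
            exact ⟨l, by simp [hl], hsub⟩

theorem mem_infix_join : ∀ (ls : List (List Char)) (l : List Char), l ∈ ls →
    l <:+: PySem.Chars.join ['\n'] ls := by
  intro ls
  induction ls with
  | nil => intro l hl; simp at hl
  | cons x r ih =>
      intro l hl
      cases r with
      | nil =>
          simp at hl
          subst hl
          rw [PySem.Chars.join_singleton]
      | cons y rs =>
          rw [PySem.Chars.join_cons_cons]
          rcases List.mem_cons.mp hl with rfl | hl
          · have h2 : l <:+: l ++ (['\n'] ++ PySem.Chars.join ['\n'] (y :: rs)) :=
              List.infix_append_left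
            simpa [List.append_assoc] using h2
          · have := ih l hl
            have h2 : PySem.Chars.join ['\n'] (y :: rs) <:+ x ++ ['\n'] ++ PySem.Chars.join ['\n'] (y :: rs) :=
              List.suffix_append _ _
            exact this.trans h2.isInfix

theorem join_append : ∀ (xs ys : List (List Char)), xs ≠ [] → ys ≠ [] →
    PySem.Chars.join ['\n'] (xs ++ ys) =
      PySem.Chars.join ['\n'] xs ++ '\n' :: PySem.Chars.join ['\n'] ys := by
  intro xs
  induction xs with
  | nil => intro ys h _; exact absurd rfl h
  | cons x r ih =>
      intro ys _ hys
      cases r with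
      | nil =>
          cases ys with
          | nil => exact absurd rfl hys
          | cons y rs =>
              rw [List.singleton_append, PySem.Chars.join_cons_cons, PySem.Chars.join_singleton]
              simp
      | cons z zs =>
          have hz : x :: (z :: zs) ++ ys = x :: ((z :: zs) ++ ys) := rfl
          obtain ⟨w, ws, hw⟩ : ∃ w ws, (z :: zs) ++ ys = w :: ws := ⟨z, zs ++ ys, rfl⟩
          rw [List.cons_append, hw, PySem.Chars.join_cons_cons, ← hw,
            ih ys (by simp) hys, PySem.Chars.join_cons_cons]
          simp

def pvF (L : List (List Char)) : Nat := (L.map (fun t => t.length + 1)).sum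

theorem join_cons_length : ∀ (L : List (List Char)) (x : List Char),
    (PySem.Chars.join ['\n'] (x :: L)).length = x.length + pvF L := by
  intro L
  induction L with
  | nil => intro x; rw [PySem.Chars.join_singleton]; simp [pvF]
  | cons y r ih =>
      intro x
      rw [PySem.Chars.join_cons_cons]
      simp only [List.length_append, ih y]
      simp [pvF]
      omega

-- ---------- the B loop walks the remaining lines ----------

theorem takeWhile_all {α : Type} (p : α → Bool) (t : List α) (h : t.all p) :
    t.takeWhile p = t := by
  induction t with
  | nil => rfl
  | cons c r ih =>
      simp at h
      simp [List.takeWhile_cons, h.1, ih (List.all_eq_true.mpr h.2)]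

theorem pvLoopB_neg (cs : List Char) (ind : Nat) : ∀ (f : Nat), pvLoopB cs ind f (-1) = -1 := by
  intro f
  cases f with
  | zero => rfl
  | succ f => rw [pvLoopB]; simp

theorem dropWhile_eq_drop' {α : Type} (p : α → Bool) (l : List α) :
    l.dropWhile p = l.drop (l.takeWhile p).length := by
  calc l.dropWhile p
      = List.drop (l.takeWhile p).length (l.takeWhile p ++ l.dropWhile p) :=
        (List.drop_left ..).symm
    _ = l.drop (l.takeWhile p).length := by
        rw [List.takeWhile_append_dropWhile]

theorem drop_succ_of_drop_cons (cs : List Char) (e : Nat) (c : Char) (r : List Char)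
    (h : cs.drop e = c :: r) : cs.drop (e + 1) = r := by
  rw [← List.drop_drop (j := e) (i := 1), h]
  rfl

theorem all_pvWs (t : List Char) (h : '\n' ∉ t) :
    t.all pvWs = t.all PySem.Chars.isspace := by
  induction t with
  | nil => rfl
  | cons c r ih =>
      have hc : c ≠ '\n' := fun e => h (e ▸ List.mem_cons_self ..)
      have hr : '\n' ∉ r := fun e => h (List.mem_cons_of_mem _ e)
      by_cases hs : PySem.Chars.isspace c <;> simp [pvWs, hc, hs, ih hr]

theorem drop_cons_length (cs : List Char) (e : Nat) (c : Char) (r : List Char)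
    (h : cs.drop e = c :: r) : e < cs.length ∧ cs.length = e + 1 + r.length := by
  have h2 := List.length_drop (l := cs) (i := e)
  rw [h] at h2
  simp at h2
  omega

theorem getD_of_drop_cons (cs : List Char) (j : Nat) (c : Char) (r : List Char) (d : Char)
    (h : cs.drop j = c :: r) : cs.getD j d = c := by
  have h2 : cs[j]? = some c := by
    rw [← List.head?_drop, h]; rfl
  simp [List.getD, h2]

theorem keep_cons_if (ind : Nat) (t : List Char) (ts' : List (List Char)) (e : Nat)
    (hkeep : pvKeep ind t = true) :
    (if ts'.takeWhile (pvKeep ind) = ts' then (-1 : Int)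
     else ((e + 1 + t.length + pvF (ts'.takeWhile (pvKeep ind)) : Nat) : Int)) =
    (if (t :: ts').takeWhile (pvKeep ind) = t :: ts' then (-1 : Int)
     else ((e + pvF ((t :: ts').takeWhile (pvKeep ind)) : Nat) : Int)) := by
  rw [List.takeWhile_cons_of_pos hkeep]
  by_cases hcond : ts'.takeWhile (pvKeep ind) = ts'
  · rw [if_pos hcond, if_pos (by rw [hcond])]
  · rw [if_neg hcond, if_neg (by simp [hcond])]
    congr 1
    simp [pvF]
    omega

theorem pvLoopB_spec (cs : List Char) (ind : Nat) :
    ∀ (ts : List (List Char)) (fuel e : Nat),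
      ts.length + 1 ≤ fuel →
      (∀ t ∈ ts, '\n' ∉ t) →
      cs.drop e = '\n' :: PySem.Chars.join ['\n'] ts →
      pvLoopB cs ind fuel (e : Int) =
        (if ts.takeWhile (pvKeep ind) = ts then (-1 : Int)
         else ((e + pvF (ts.takeWhile (pvKeep ind)) : Nat) : Int)) := by
  intro ts
  induction ts with
  | nil =>
      intro fuel e hf _ hdrop
      obtain ⟨f, rfl⟩ : ∃ f, fuel = f + 1 := ⟨fuel - 1, by omega⟩
      obtain ⟨helt, hlen⟩ := drop_cons_length cs e _ _ hdrop
      rw [PySem.Chars.join_nil] at hdrop hlen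
      simp only [List.length_nil] at hlen
      have hdrop1 : cs.drop (e + 1) = [] := drop_succ_of_drop_cons cs e _ _ hdrop
      rw [pvLoopB]
      rw [if_neg (by omega)]
      simp only [Int.toNat_natCast]
      rw [pvSkipWs_eq, hdrop1]
      simp only [List.takeWhile_nil, List.length_nil, Nat.add_zero]
      rw [if_neg (by omega)]
      have hff : PySem.Chars.findFrom cs ['\n'] ((e + 1 : Nat) : Int) = -1 := by
        rw [PySem.Chars.findFrom_natCast cs ['\n'] (e+1) (by omega), hdrop1]
        rw [find_char]
        simp
      have hcast : ((e : Int) + 1) = ((e + 1 : Nat) : Int) := by push_cast; ring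
      rw [show ((e + 1 + 0 : Nat) : Int) = ((e + 1 : Nat) : Int) by norm_num]
      rw [hff, pvLoopB_neg]
      simp
  | cons t ts' ih =>
      intro fuel e hf hnl hdrop
      obtain ⟨f, rfl⟩ : ∃ f, fuel = f + 1 := ⟨fuel - 1, by omega⟩
      obtain ⟨helt, hlen⟩ := drop_cons_length cs e _ _ hdrop
      have hnt : '\n' ∉ t := hnl t (by simp)
      have hts'len : ts'.length + 1 ≤ f := by
        simp only [List.length_cons] at hf; omega
      have hdrop1 : cs.drop (e + 1) = PySem.Chars.join ['\n'] (t :: ts') :=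
        drop_succ_of_drop_cons cs e _ _ hdrop
      obtain ⟨X, hJX, hXcase⟩ : ∃ X, PySem.Chars.join ['\n'] (t :: ts') = t ++ X ∧
          ((ts' = [] ∧ X = []) ∨ (ts' ≠ [] ∧ X = '\n' :: PySem.Chars.join ['\n'] ts')) := by
        cases ts' with
        | nil => exact ⟨[], by rw [PySem.Chars.join_singleton]; simp, Or.inl ⟨rfl, rfl⟩⟩
        | cons z zs => exact ⟨'\n' :: PySem.Chars.join ['\n'] (z :: zs),
            by rw [PySem.Chars.join_cons_cons]; simp, Or.inr ⟨by simp, rfl⟩⟩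
      have hdropX : cs.drop (e + 1) = t ++ X := by rw [hdrop1, hJX]
      have hXtw : X.takeWhile pvWs = [] := by
        rcases hXcase with ⟨_, rfl⟩ | ⟨_, rfl⟩
        · rfl
        · rw [List.takeWhile_cons_of_neg (by simp [pvWs])]
      have hlenX : cs.length = e + 1 + t.length + X.length := by
        have := congrArg List.length hdropX
        rw [List.length_drop, List.length_append] at this
        omega
      have hskip : pvSkipWs (cs.drop (e + 1)) = (t.takeWhile pvWs).length := by
        rw [hdropX, pvSkipWs_eq, takeWhile_append']
        by_cases hall : t.all pvWs
        · rw [if_pos hall, hXtw, takeWhile_all _ _ hall]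
          simp
        · rw [if_neg (by simp [hall])]
      rw [pvLoopB, if_neg (by omega)]
      simp only [Int.toNat_natCast]
      rw [hskip]
      by_cases hblank : t.all PySem.Chars.isspace
      · -- blank line: kept
        have hkeep : pvKeep ind t = true := by
          simp [pvKeep, (strip_eq_nil_iff t).mpr (List.all_eq_true.mp hblank)]
        have htwt : t.takeWhile pvWs = t :=
          takeWhile_all _ _ (by rw [all_pvWs t hnt]; exact hblank)
        rw [htwt]
        rcases hXcase with ⟨rfl, rfl⟩ | ⟨hne, rfl⟩
        · -- last line of the text: j = len, find gives -1
          simp only [List.length_nil, Nat.add_zero] at hlenX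
          rw [if_neg (fun hcon => by have := hcon.1; omega)]
          have hdropn : cs.drop (e + 1 + t.length) = [] :=
            List.drop_eq_nil_of_le (by omega)
          have hff : PySem.Chars.findFrom cs ['\n'] ((e + 1 + t.length : Nat) : Int) = -1 := by
            rw [PySem.Chars.findFrom_natCast cs ['\n'] (e + 1 + t.length) (by omega), hdropn,
              find_char]
            simp
          rw [hff, pvLoopB_neg]
          rw [if_pos (by rw [List.takeWhile_cons_of_pos hkeep, List.takeWhile_nil])]
        · -- more lines follow: s[j] is the '\n' ending this blank line
          have hdropj : cs.drop (e + 1 + t.length) = '\n' :: PySem.Chars.join ['\n'] ts' := by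
            have h2 := congrArg (List.drop t.length) hdropX
            rw [List.drop_drop, List.drop_left] at h2
            exact h2
          rw [if_neg (by
            intro hcon
            have h3 := hcon.2.1
            rw [getD_of_drop_cons cs _ _ _ _ hdropj] at h3
            exact h3 rfl)]
          have hff : PySem.Chars.findFrom cs ['\n'] ((e + 1 + t.length : Nat) : Int) =
              ((e + 1 + t.length : Nat) : Int) := by
            rw [PySem.Chars.findFrom_natCast cs ['\n'] (e + 1 + t.length) (by omega), hdropj,
              find_char]
            simp
          rw [hff, ih f (e + 1 + t.length) hts'len (fun x hx => hnl x (by simp [hx])) hdropj]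
          exact keep_cons_if ind t ts' e hkeep
      · -- non-blank line: its indent decides keep/break
        obtain ⟨c1, hc1, hc1f⟩ : ∃ c ∈ t, PySem.Chars.isspace c = false := by
          simpa using hblank
        have htwlt : (t.takeWhile pvWs).length < t.length := by
          rw [takeWhile_pvWs_eq_isspace t hnt]
          by_contra hge
          have hle := (List.takeWhile_prefix (p := PySem.Chars.isspace) (l := t)).length_le
          have heq : t.takeWhile PySem.Chars.isspace = t :=
            (List.takeWhile_prefix _).eq_of_length (by omega)
          have h4 := List.mem_takeWhile_imp (l := t) (p := PySem.Chars.isspace)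
            (by rw [heq]; exact hc1)
          rw [hc1f] at h4
          cases h4
        obtain ⟨d, r0, hd0⟩ : ∃ d r0, t.dropWhile PySem.Chars.isspace = d :: r0 := by
          cases hdw : t.dropWhile PySem.Chars.isspace with
          | nil =>
              exfalso
              have := List.dropWhile_eq_nil_iff.mp hdw c1 hc1
              rw [hc1f] at this
              cases this
          | cons d r0 => exact ⟨d, r0, rfl⟩
        have hdns : PySem.Chars.isspace d = false := drop_head_false hd0
        have hdmem : d ∈ t :=
          (List.dropWhile_sublist PySem.Chars.isspace).subset (hd0 ▸ List.mem_cons_self ..)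
        have hdnn : d ≠ '\n' := fun hEq => hnt (hEq ▸ hdmem)
        have htwc : (t.takeWhile pvWs).length = (t.takeWhile PySem.Chars.isspace).length := by
          rw [takeWhile_pvWs_eq_isspace t hnt]
        have hdwlen : (t.dropWhile PySem.Chars.isspace).length =
            t.length - (t.takeWhile PySem.Chars.isspace).length := by
          have h5 := congrArg List.length (List.takeWhile_append_dropWhile
            (p := PySem.Chars.isspace) (l := t))
          rw [List.length_append] at h5
          omega
        have hdropj : cs.drop (e + 1 + (t.takeWhile pvWs).length) =
            t.dropWhile PySem.Chars.isspace ++ X := by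
          have h2 := congrArg (List.drop (t.takeWhile pvWs).length) hdropX
          rw [List.drop_drop] at h2
          rw [h2, List.drop_append_of_le_length (by omega), htwc,
            ← dropWhile_eq_drop' PySem.Chars.isspace t]
        have hgetd : cs.getD (e + 1 + (t.takeWhile pvWs).length) ' ' = d := by
          apply getD_of_drop_cons cs _ d (r0 ++ X)
          rw [hdropj, hd0]
          rfl
        have hindent : pvIndentA t = (t.takeWhile pvWs).length := by
          rw [indentA_eq_takeWhile, htwc]
        by_cases hle : (t.takeWhile pvWs).length ≤ ind
        · -- shallow non-blank line: break, nothing more is kept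
          have hkeepf : pvKeep ind t = false := by
            have hstrip : PySem.Chars.strip t ≠ [] := by
              rw [Ne, strip_eq_nil_iff]
              intro hall
              rw [hall c1 hc1] at hc1f
              cases hc1f
            simp [pvKeep, hstrip, hindent]
            omega
          rw [if_pos ⟨by omega, by rw [hgetd]; exact hdnn, by push_cast; omega⟩]
          rw [List.takeWhile_cons_of_neg (by simp [hkeepf]), if_neg (by simp)]
          simp [pvF]
        · -- deeper-indented line: kept
          have hkeep : pvKeep ind t = true := by
            simp [pvKeep, hindent]
            omega
          rw [if_neg (fun hcon => by have := hcon.2.2; push_cast at this; omega)]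
          rcases hXcase with ⟨rfl, rfl⟩ | ⟨hne, rfl⟩
          · -- last line: find gives -1
            simp only [List.length_nil, Nat.add_zero] at hlenX
            have hfind : PySem.Chars.find
                (t.dropWhile PySem.Chars.isspace ++ []) ['\n'] = -1 := by
              rw [find_char, if_neg]
              intro hmem
              simp at hmem
              exact hnt ((List.dropWhile_sublist PySem.Chars.isspace).subset hmem)
            have hff : PySem.Chars.findFrom cs ['\n']
                ((e + 1 + (t.takeWhile pvWs).length : Nat) : Int) = -1 := by
              rw [PySem.Chars.findFrom_natCast cs ['\n'] _ (by omega), hdropj, hfind]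
              simp
            rw [hff, pvLoopB_neg]
            rw [if_pos (by rw [List.takeWhile_cons_of_pos hkeep, List.takeWhile_nil])]
          · -- more lines: find lands on the '\n' ending this line
            have hdropj2 : cs.drop (e + 1 + t.length) = '\n' :: PySem.Chars.join ['\n'] ts' := by
              have h2 := congrArg (List.drop t.length) hdropX
              rw [List.drop_drop, List.drop_left] at h2
              exact h2
            have hall' : (t.dropWhile PySem.Chars.isspace).all (· ≠ '\n') = true := by
              rw [List.all_eq_true]
              intro x hx
              simp only [decide_eq_true_eq]
              intro hEq
              exact hnt (hEq ▸ (List.dropWhile_sublist PySem.Chars.isspace).subset hx)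
            have hfind : PySem.Chars.find
                (t.dropWhile PySem.Chars.isspace ++ '\n' :: PySem.Chars.join ['\n'] ts') ['\n'] =
                (((t.dropWhile PySem.Chars.isspace).length : Nat) : Int) := by
              rw [find_char, if_pos (by simp), takeWhile_append', if_pos hall',
                List.takeWhile_cons_of_neg (by simp)]
              simp
            have hff : PySem.Chars.findFrom cs ['\n']
                ((e + 1 + (t.takeWhile pvWs).length : Nat) : Int) =
                ((e + 1 + t.length : Nat) : Int) := by
              rw [PySem.Chars.findFrom_natCast cs ['\n'] _ (by omega), hdropj, hfind,
                if_neg (by omega)]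
              push_cast
              omega
            rw [hff, ih f (e + 1 + t.length) hts'len (fun x hx => hnl x (by simp [hx])) hdropj2]
            exact keep_cons_if ind t ts' e hkeep

theorem pvF_ge_length (L : List (List Char)) : L.length ≤ pvF L := by
  induction L with
  | nil => simp [pvF]
  | cons x r ih => simp [pvF] at ih ⊢; omega

-- A's port, given the anchor decomposition, returns the joined kept lines
theorem A_value (t : String) (cs : List Char) (pre : List (List Char)) (head : List Char)
    (tail : List (List Char)) (hcs : t.toList = cs)
    (hlines : pvLines cs = pre ++ head :: tail)
    (hpreAll : ∀ l ∈ pre, pvAnchorA l = false)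
    (hhead : pvAnchorA head = true)
    (htail : ∀ l ∈ tail, pvAnchorA l = false) :
    extract_function_from_response t =
      String.ofList (PySem.Chars.join ['\n']
        (head :: tail.takeWhile (pvKeep (pvIndentA head)))) := by
  unfold extract_function_from_response
  rw [show ("\n".toList) = ['\n'] from rfl, hcs, splitOn_eq_pvLines]
  have hloop : pvLoopA (pvLines cs) [] false 0 =
      head :: tail.takeWhile (pvKeep (pvIndentA head)) := by
    conv_lhs => rw [hlines]
    rw [pvLoopA_skip _ _ _ _ hpreAll]
    show (if pvAnchorA head = true then pvLoopA tail ([] ++ [head]) true (pvIndentA head)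
      else _) = _
    rw [if_pos hhead, pvLoopA_body _ _ _ htail]
    simp
  rw [hloop]
  set tk := tail.takeWhile (pvKeep (pvIndentA head)) with htk
  have hprefix : head <+: PySem.Chars.join ['\n'] (head :: tk) := by
    cases tk with
    | nil => simp [PySem.Chars.join, List.intercalate, List.intersperse]
    | cons b r => simp [PySem.Chars.join, List.intercalate, List.intersperse]
  have hinfix : "def construct_features".toList <:+: PySem.Chars.join ['\n'] (head :: tk) :=
    ((PySem.Chars.isIn_iff_infix _ _).mp hhead).trans hprefix.isInfix
  have hisin : pvAnchorA (PySem.Chars.join ['\n'] (head :: tk)) = true := by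
    unfold pvAnchorA
    exact (PySem.Chars.isIn_iff_infix _ _).mpr hinfix
  have hstrip : PySem.Chars.strip (PySem.Chars.join ['\n'] (head :: tk)) ≠ [] :=
    strip_ne_nil_of_mem_not_space _ 'd' (hinfix.subset (by decide)) (by decide)
  unfold pvValidateA
  rw [if_neg hstrip, if_neg (by exact fun h => absurd hisin (by simp [h]))]

-- B's port, given the anchor decomposition, returns the same joined kept lines
theorem B_value (t : String) (cs : List Char) (pre : List (List Char)) (head : List Char)
    (tail : List (List Char)) (hcs : t.toList = cs)
    (hlines : pvLines cs = pre ++ head :: tail)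
    (hpreAll : ∀ l ∈ pre, pvAnchorA l = false)
    (hhead : pvAnchorA head = true) :
    extract_function_from_response_alt t =
      String.ofList (PySem.Chars.join ['\n']
        (head :: tail.takeWhile (pvKeep (pvIndentA head)))) := by
  have hmne : ("def construct_features".toList : List Char) ≠ [] := by decide
  have hmnl : '\n' ∉ "def construct_features".toList := by decide
  have hmklen : 1 ≤ ("def construct_features".toList : List Char).length := by decide
  have hnlhead : '\n' ∉ head := pvLines_no_nl cs head (by rw [hlines]; simp)
  have hnltail : ∀ l ∈ tail, '\n' ∉ l := fun l hl =>
    pvLines_no_nl cs l (by rw [hlines]; simp [hl])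
  have hinfhead : "def construct_features".toList <:+: head :=
    (PySem.Chars.isIn_iff_infix _ _).mp hhead
  have hdinhead : 'd' ∈ head := hinfhead.subset (by decide)
  have hcsj : PySem.Chars.join ['\n'] (pre ++ head :: tail) = cs := by
    rw [← hlines]; exact pvLines_join cs
  obtain ⟨u, v, huv⟩ := hinfhead
  have hj0 : "def construct_features".toList <+: head.drop u.length := by
    rw [← huv, List.append_assoc, List.drop_left]
    exact List.prefix_append _ v
  have hj0len : u.length + "def construct_features".toList.length ≤ head.length := by
    rw [← huv]; simp [List.length_append]
  have hinfcs : "def construct_features".toList <:+: cs := by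
    have h1 := mem_infix_join (pre ++ head :: tail) head (by simp)
    rw [hcsj] at h1
    exact List.IsInfix.trans ⟨u, v, huv⟩ h1
  have hposnn : 0 ≤ PySem.Chars.find cs "def construct_features".toList :=
    (PySem.Chars.find_nonneg_iff _ _).mpr hinfcs
  have hposle : PySem.Chars.find cs "def construct_features".toList ≤ cs.length :=
    PySem.Chars.find_le_length _ _
  have hspec := PySem.Chars.find_spec (s := cs) (sub := "def construct_features".toList) hposnn
  obtain ⟨X, hJX, hXcase⟩ : ∃ X, PySem.Chars.join ['\n'] (head :: tail) = head ++ X ∧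
      ((tail = [] ∧ X = []) ∨ (tail ≠ [] ∧ X = '\n' :: PySem.Chars.join ['\n'] tail)) := by
    cases tail with
    | nil => exact ⟨[], by rw [PySem.Chars.join_singleton]; simp, Or.inl ⟨rfl, rfl⟩⟩
    | cons z zs => exact ⟨'\n' :: PySem.Chars.join ['\n'] (z :: zs),
        by rw [PySem.Chars.join_cons_cons]; simp, Or.inr ⟨by simp, rfl⟩⟩
  set p := (PySem.Chars.find cs "def construct_features".toList).toNat with hpdef
  clear_value p
  obtain ⟨Q, hQcs, hstart⟩ : ∃ Q : List Char,
      cs = Q ++ PySem.Chars.join ['\n'] (head :: tail) ∧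
      (PySem.Chars.rfind (PySem.Chars.slice cs none
          (some (PySem.Chars.find cs "def construct_features".toList))) ['\n'] + 1).toNat
        = Q.length := by
    cases hpc : pre with
    | nil =>
        rw [hpc] at hcsj
        simp only [List.nil_append] at hcsj
        refine ⟨[], by simpa using hcsj.symm, ?_⟩
        have hcs0 : cs = head ++ X := by rw [← hcsj, hJX]
        have hple : p ≤ u.length := by
          by_contra hlt
          push_neg at hlt
          refine hspec.2 u.length hlt ?_
          rw [hcs0, List.drop_append_of_le_length (by omega)]
          exact hj0.trans (List.prefix_append _ _)
        have hphead : p ≤ head.length := by omega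
        have htake : cs.take p = head.take p := by
          rw [hcs0, List.take_append, Nat.sub_eq_zero_of_le hphead]
          simp
        rw [PySem.Chars.slice_eq_listSlice, PySem.List.slice_to cs hposnn, ← hpdef, htake]
        rw [rfind_char_none _ _ (fun hm => hnlhead ((List.take_sublist ..).subset hm))]
        simp
    | cons p0 ps =>
        rw [hpc] at hcsj hpreAll
        have hprene : (p0 :: ps : List (List Char)) ≠ [] := by simp
        have hQeq : cs = (PySem.Chars.join ['\n'] (p0 :: ps) ++ ['\n']) ++
            PySem.Chars.join ['\n'] (head :: tail) := by
          rw [← hcsj, join_append (p0 :: ps) (head :: tail) hprene (by simp)]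
          simp
        refine ⟨PySem.Chars.join ['\n'] (p0 :: ps) ++ ['\n'], hQeq, ?_⟩
        set J := PySem.Chars.join ['\n'] (p0 :: ps) with hJdef
        have hnlq : cs[J.length]? = some '\n' := by
          rw [hQeq, List.getElem?_append_left (by simp),
            List.getElem?_append_right (Nat.le_refl _)]
          simp
        have hqlep : J.length + 1 ≤ p := by
          by_contra hlt
          push_neg at hlt
          obtain ⟨w, hw⟩ := hspec.1
          by_cases hfit : p + "def construct_features".toList.length ≤ J.length
          · have h2 : cs.take J.length = J := by
              rw [hQeq, List.take_append, List.take_append,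
                List.take_of_length_le (by omega),
                Nat.sub_eq_zero_of_le (by simp),
                Nat.sub_eq_zero_of_le (by simp)]
              simp
            have h1 : "def construct_features".toList <+: (cs.take J.length).drop p := by
              rw [List.drop_take, List.prefix_take_iff]
              exact ⟨⟨w, hw⟩, by omega⟩
            rw [h2] at h1
            have hmkJ : "def construct_features".toList <:+: J :=
              h1.isInfix.trans (List.drop_suffix p J).isInfix
            obtain ⟨l, hl, hsubl⟩ := infix_join_mem (p0 :: ps) _ hmne hmnl hmkJ
            have hfalse := hpreAll l hl
            rw [pvAnchorA, (PySem.Chars.isIn_iff_infix _ _).mpr hsubl] at hfalse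
            cases hfalse
          · push_neg at hfit
            have hidx : "def construct_features".toList[J.length - p]? = some '\n' := by
              have h1 : (cs.drop p)[J.length - p]? = cs[p + (J.length - p)]? := by
                rw [List.getElem?_drop]
              rw [show p + (J.length - p) = J.length by omega, hnlq, ← hw,
                List.getElem?_append_left (by omega)] at h1
              exact h1
            exact hmnl (List.mem_of_getElem? hidx)
        have hdropq : cs.drop (J.length + 1) = PySem.Chars.join ['\n'] (head :: tail) := by
          rw [hQeq, show J.length + 1 = (J ++ ['\n']).length by simp, List.drop_left]
        have hpub : p ≤ J.length + 1 + u.length := by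
          by_contra hlt
          push_neg at hlt
          refine hspec.2 (J.length + 1 + u.length) (by exact hlt) ?_
          have h3 : cs.drop (J.length + 1 + u.length) = head.drop u.length ++ X := by
            rw [← List.drop_drop, hdropq, hJX, List.drop_append_of_le_length (by omega)]
          rw [h3]
          exact hj0.trans (List.prefix_append _ _)
        have htakep : cs.take p = (J ++ ['\n']) ++ head.take (p - (J.length + 1)) := by
          rw [hQeq, List.take_append, List.take_of_length_le (by simp; omega)]
          congr 1
          rw [hJX, List.take_append,
            show p - (J ++ ['\n']).length = p - (J.length + 1) by simp,
            show p - (J.length + 1) - head.length = 0 by omega]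
          simp
        have hrf : PySem.Chars.rfind (cs.take p) ['\n'] = (J.length : Int) := by
          apply rfind_char_hit
          · rw [htakep, List.getElem?_append_left (by simp),
              List.getElem?_append_right (Nat.le_refl _)]
            simp
          · intro j hj
            rw [htakep]
            intro hsome
            have hjge : (J ++ ['\n']).length ≤ j := by simp; omega
            rw [List.getElem?_append_right hjge] at hsome
            exact hnlhead ((List.take_sublist ..).subset (List.mem_of_getElem? hsome))
        rw [PySem.Chars.slice_eq_listSlice, PySem.List.slice_to cs hposnn, ← hpdef, hrf]
        simp
  -- unfold B's port and substitute the computed anchor-line start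
  have hposne : ¬ (PySem.Chars.find cs "def construct_features".toList = -1) := by omega
  simp only [extract_function_from_response_alt]
  rw [hcs, if_neg hposne, hstart]
  have hQle : Q.length ≤ cs.length := by
    have h1 := congrArg List.length hQcs
    rw [List.length_append] at h1
    omega
  have hdropQ : cs.drop Q.length = PySem.Chars.join ['\n'] (head :: tail) := by
    rw [hQcs, List.drop_left]
  have hindent : pvSkipWs (cs.drop Q.length) = pvIndentA head := by
    rw [hdropQ, hJX, pvSkipWs_eq, takeWhile_append']
    have hnotall : head.all pvWs = false := by
      rw [all_pvWs head hnlhead]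
      rw [List.all_eq_false]
      exact ⟨'d', hdinhead, by decide⟩
    rw [if_neg (by simp [hnotall]), takeWhile_pvWs_eq_isspace head hnlhead,
      indentA_eq_takeWhile]
  rw [hindent]
  rcases hXcase with ⟨rfl, rfl⟩ | ⟨htne, rfl⟩
  · -- single anchor line, nothing after it
    have hfind0 : PySem.Chars.find (head ++ []) ['\n'] = -1 := by
      rw [find_char, if_neg (by simpa using hnlhead)]
    have hff : PySem.Chars.findFrom cs ['\n'] ((Q.length : Nat) : Int) = -1 := by
      rw [PySem.Chars.findFrom_natCast cs ['\n'] Q.length hQle, hdropQ, hJX, hfind0]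
      simp
    rw [hff, pvLoopB_neg, if_pos rfl]
    rw [PySem.Chars.slice_eq_listSlice,
      PySem.List.slice_from cs (by omega : (0 : Int) ≤ ((Q.length : Nat) : Int))]
    simp only [Int.toNat_natCast]
    rw [hdropQ]
    simp
  · -- at least one following line: enter the scan loop
    have hallne : head.all (· ≠ '\n') = true := by
      rw [List.all_eq_true]
      intro x hx
      simp only [decide_eq_true_eq]
      exact fun hEq => hnlhead (hEq ▸ hx)
    have hfind1 : PySem.Chars.find (head ++ '\n' :: PySem.Chars.join ['\n'] tail) ['\n'] =
        ((head.length : Nat) : Int) := by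
      rw [find_char, if_pos (by simp), takeWhile_append', if_pos hallne,
        List.takeWhile_cons_of_neg (by simp)]
      simp
    have hff : PySem.Chars.findFrom cs ['\n'] ((Q.length : Nat) : Int) =
        ((Q.length + head.length : Nat) : Int) := by
      rw [PySem.Chars.findFrom_natCast cs ['\n'] Q.length hQle, hdropQ, hJX, hfind1,
        if_neg (by omega)]
      push_cast
      omega
    have hdropQH : cs.drop (Q.length + head.length) = '\n' :: PySem.Chars.join ['\n'] tail := by
      rw [← List.drop_drop, hdropQ, hJX, List.drop_left]
    have hfuel : tail.length + 1 ≤ cs.length + 1 := by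
      have h1 := pvF_ge_length tail
      have h2 := congrArg List.length hdropQH
      rw [List.length_drop] at h2
      simp only [List.length_cons] at h2
      obtain ⟨z, zs, rfl⟩ : ∃ z zs, tail = z :: zs := by
        cases tail with
        | nil => exact absurd rfl htne
        | cons z zs => exact ⟨z, zs, rfl⟩
      rw [join_cons_length] at h2
      simp only [pvF, List.map_cons, List.sum_cons, List.length_cons] at h1 ⊢
      simp only [pvF] at h2
      omega
    rw [hff, pvLoopB_spec cs (pvIndentA head) tail (cs.length + 1) (Q.length + head.length)
      hfuel hnltail hdropQH]
    by_cases hcond : tail.takeWhile (pvKeep (pvIndentA head)) = tail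
    · rw [if_pos hcond, if_pos rfl]
      rw [PySem.Chars.slice_eq_listSlice,
        PySem.List.slice_from cs (by omega : (0 : Int) ≤ ((Q.length : Nat) : Int))]
      simp only [Int.toNat_natCast]
      rw [hdropQ, hcond]
    · rw [if_neg hcond, if_neg (by omega)]
      rw [PySem.Chars.slice_eq_listSlice, PySem.List.slice_natCast]
      rw [hdropQ]
      have hsplitt : tail.takeWhile (pvKeep (pvIndentA head)) ++
          tail.dropWhile (pvKeep (pvIndentA head)) = tail := List.takeWhile_append_dropWhile
      have hrestne : tail.dropWhile (pvKeep (pvIndentA head)) ≠ [] := by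
        intro h0
        apply hcond
        apply (List.takeWhile_prefix _).eq_of_length
        have h1 := congrArg List.length hsplitt
        rw [h0] at h1
        simpa using h1
      have hjoin2 : PySem.Chars.join ['\n'] (head :: tail) =
          PySem.Chars.join ['\n'] (head :: tail.takeWhile (pvKeep (pvIndentA head))) ++
            '\n' :: PySem.Chars.join ['\n'] (tail.dropWhile (pvKeep (pvIndentA head))) := by
        conv_lhs => rw [← hsplitt]
        rw [show head :: (tail.takeWhile (pvKeep (pvIndentA head)) ++
            tail.dropWhile (pvKeep (pvIndentA head))) =
          (head :: tail.takeWhile (pvKeep (pvIndentA head))) ++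
            tail.dropWhile (pvKeep (pvIndentA head)) from rfl,
          join_append _ _ (by simp) hrestne]
      rw [hjoin2,
        show Q.length + head.length + pvF (tail.takeWhile (pvKeep (pvIndentA head))) - Q.length
          = head.length + pvF (tail.takeWhile (pvKeep (pvIndentA head))) by omega,
        show head.length + pvF (tail.takeWhile (pvKeep (pvIndentA head))) =
          (PySem.Chars.join ['\n']
            (head :: tail.takeWhile (pvKeep (pvIndentA head)))).length from
          (join_cons_length _ head).symm,
        List.take_left]


-- ===== VERDICT (by name: the statement is the Claim_ definition above) =====
theorem extract_function_from_response_spec : Claim_equal_extract_function_from_response := by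
  intro t _hdom hpre
  unfold Spec_extract_function_from_response
  unfold Pre_extract_function_from_response at hpre
  rw [show ("\n".toList) = ['\n'] from rfl, splitOn_eq_pvLines] at hpre
  set cs := t.toList with hcs
  set lines := pvLines cs with hlines0
  set f : List Char → Bool := fun l => PySem.Chars.isIn "def construct_features".toList l with hf
  set p : List Char → Bool := fun l => !PySem.Chars.isIn "def construct_features".toList l with hp
  have hsplit : lines.takeWhile p ++ lines.dropWhile p = lines := List.takeWhile_append_dropWhile
  have hpreAll : ∀ l ∈ lines.takeWhile p, pvAnchorA l = false := by
    intro l hl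
    have := List.mem_takeWhile_imp hl
    simpa [hp, pvAnchorA] using this
  have hc : lines.countP f = (lines.takeWhile p).countP f + (lines.dropWhile p).countP f := by
    conv_lhs => rw [← hsplit]
    exact List.countP_append ..
  have h0 : (lines.takeWhile p).countP f = 0 := by
    rw [List.countP_eq_zero]
    intro l hl
    simpa [hf, pvAnchorA] using hpreAll l hl
  cases hdrop : lines.dropWhile p with
  | nil =>
      exfalso
      rw [hdrop, h0, hpre] at hc
      simp at hc
  | cons head tail =>
      have hne : lines.dropWhile p ≠ [] := by rw [hdrop]; simp
      have hhead : pvAnchorA head = true := by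
        have h1 := List.head_dropWhile_not p hne
        have h2 : p head = false := by simpa [hdrop] using h1
        rw [hp] at h2
        simpa [pvAnchorA] using h2
      have htail : ∀ l ∈ tail, pvAnchorA l = false := by
        rw [hdrop, h0, List.countP_cons, hpre] at hc
        have hch : f head = true := by simpa [hf, pvAnchorA] using hhead
        rw [if_pos hch] at hc
        have ht0 : tail.countP f = 0 := by omega
        intro l hl
        simpa [hf, pvAnchorA] using List.countP_eq_zero.mp ht0 l hl
      have hlines : pvLines cs = lines.takeWhile p ++ head :: tail := by
        rw [← hdrop, hsplit, hlines0]
      rw [A_value t cs (lines.takeWhile p) head tail hcs hlines hpreAll hhead htail,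
        B_value t cs (lines.takeWhile p) head tail hcs hlines hpreAll hhead]
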